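-- pv_equiv track=rewrite | github.com/EricWay1024/aoc2024 | no-rust/25-1.py | compute_key_heights
-- ===== SOURCE A (Python) =====
-- def compute_key_heights(schematic, num_cols=5, max_height=5):
--     """
--     Computes the heights for a key schematic.
--     For each column, counts the number of consecutive '#' characters starting from the second last row upwards.
--     Stops counting when a '.' is encountered or max_height is reached.
--     """
--     heights = []
--     for c in range(num_cols):
--         h = 0
--         for r in range(len(schematic)-2, -1, -1):  # Start from second last row up to first row
--             if schematic[r][c] == '#':
--                 h +=1
--                 if h == max_height:
--                     break
--             else:
--                 break
--         heights.append(h)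
--     return tuple(heights)
-- ===== SOURCE B (Python) =====
-- def compute_key_heights(schematic, num_cols=5, max_height=5):
--     # Single row-major top-down pass: keep one running count of consecutive '#'
--     # per column (reset on anything else), then cap each count at max_height.
--     runs = [0] * num_cols
--     for row in schematic[:-1]:
--         runs = [r + 1 if row[c] == '#' else 0 for c, r in enumerate(runs)]
--     return tuple(min(r, max_height) for r in runs)
-- ===== Notes on version B (the rewrite author's own statement) =====
-- stated objective: alternative
-- what changed: Replaces A's column-major nested scan with early break by a single row-major top-down pass maintaining one run counter per column (reset on non-'#'), capping with min at the end; Pre_ excludes non-positive max_height, a degenerate cap on which A's uncapped count and B's min-cap are both defensible, and rows shorter than num_cols, where one or both programs raise IndexError.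
-- outside the precondition, e.g. on compute_key_heights(['##', '##'], 2, 0): A returns (1, 1), B returns (0, 0); on compute_key_heights(['#', '..', 'x'], 2, 5): A returns (0, 0), B raises IndexError
import Mathlib
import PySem

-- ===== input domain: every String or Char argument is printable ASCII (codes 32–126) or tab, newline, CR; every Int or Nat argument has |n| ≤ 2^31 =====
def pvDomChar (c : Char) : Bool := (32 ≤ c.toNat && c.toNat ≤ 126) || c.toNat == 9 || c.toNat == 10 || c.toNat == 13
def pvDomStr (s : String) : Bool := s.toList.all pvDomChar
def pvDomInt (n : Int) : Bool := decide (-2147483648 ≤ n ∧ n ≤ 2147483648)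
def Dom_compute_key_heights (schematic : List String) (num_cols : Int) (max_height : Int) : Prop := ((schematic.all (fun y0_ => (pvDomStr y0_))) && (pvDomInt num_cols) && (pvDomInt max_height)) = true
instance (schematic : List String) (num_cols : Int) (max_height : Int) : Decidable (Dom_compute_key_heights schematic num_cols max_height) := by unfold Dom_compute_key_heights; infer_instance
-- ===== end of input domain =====

-- B replaces A's column-major nested scan (early break per column) with one row-major
-- top-down pass maintaining per-column run counters, capped by min at the end ("alternative").

-- ===== PORT A =====
-- inner loop 'for r in range(len(schematic)-2, -1, -1)' of A; a none cell is Python's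
-- IndexError (excluded by Pre_), the port returns the current h there as junk
def chAInner (schematic : List String) (c : Int) (mh : Int) : List Int → Int → Int
  | [], h => h
  | r :: rs, h =>
    match (PySem.List.pyGet? schematic r).bind (fun row => PySem.Str.pyGet? row c) with
    | none => h
    | some ch => if ch = '#' then (if h + 1 = mh then h + 1 else chAInner schematic c mh rs (h + 1)) else h

def compute_key_heights (schematic : List String) (num_cols : Int) (max_height : Int) : List Int :=
  (PySem.List.pyRange 0 num_cols 1).foldl
    (fun heights c =>
      heights ++ [chAInner schematic c max_height (PySem.List.pyRange ((schematic.length : Int) - 2) (-1) (-1)) 0]) []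

-- ===== PORT B =====
-- 'runs = [r + 1 if row[c] == '#' else 0 for c, r in enumerate(runs)]' over schematic[:-1];
-- a none cell is Python's IndexError (excluded by Pre_), the port resets to 0 there as junk
-- the comprehension element "r + 1 if row[c] == '#' else 0"
def bCell (row : String) (c : Int) (r : Int) : Int :=
  match PySem.Str.pyGet? row c with
  | some ch => if ch = '#' then r + 1 else 0
  | none => 0

def compute_key_heights_alt (schematic : List String) (num_cols : Int) (max_height : Int) : List Int :=
  let runs := (PySem.List.slice schematic none (some (-1))).foldl
    (fun runs row => (PySem.List.enumerate runs 0).map (fun cr => bCell row cr.1 cr.2))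
    (List.replicate num_cols.toNat (0 : Int))
  runs.map (fun r => min r max_height)

-- ===== PRECONDITION & SPEC =====
-- Pre_ excludes (a) rows other than the last shorter than num_cols: there A raises IndexError
-- unless a '.' below happens to break the column scan first, and B always raises IndexError;
-- and (b) non-positive max_height, a degenerate cap nobody would specify, on which A's
-- uncapped count and B's min-cap are both defensible values.
def Pre_compute_key_heights (schematic : List String) (num_cols : Int) (max_height : Int) : Prop :=
  num_cols ≤ 0 ∨ (1 ≤ max_height ∧ ∀ row ∈ schematic.dropLast, num_cols ≤ PySem.Str.len row)

instance (schematic : List String) (num_cols : Int) (max_height : Int) : Decidable (Pre_compute_key_heights schematic num_cols max_height) := by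
  unfold Pre_compute_key_heights; infer_instance

def pvWitness_compute_key_heights : List String × Int × Int := (["#.", "##", "..."], 2, 5)

def Spec_compute_key_heights (schematic : List String) (num_cols : Int) (max_height : Int) (out : List Int) : Prop := out = compute_key_heights_alt schematic num_cols max_height
instance (schematic : List String) (num_cols : Int) (max_height : Int) (out : List Int) : Decidable (Spec_compute_key_heights schematic num_cols max_height out) := by unfold Spec_compute_key_heights; infer_instance

-- ===== CLAIM (what is proved, stated in full; the proofs are below) =====
def Claim_equal_compute_key_heights : Prop := ∀ (schematic : List String) (num_cols : Int) (max_height : Int), Dom_compute_key_heights schematic num_cols max_height → Pre_compute_key_heights schematic num_cols max_height → Spec_compute_key_heights schematic num_cols max_height (compute_key_heights schematic num_cols max_height)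

-- ===== LEMMAS AND PROOFS =====

-- shared vocabulary for both closed forms
def colHit (c : Int) (row : String) : Bool := PySem.Str.pyGet? row c == some '#'

def runRows (c : Int) (R : List String) : Int := ((R.takeWhile (colHit c)).length : Int)

def capH (mh r : Int) : Int := if mh > 0 then min r mh else r

-- the same recursion as chAInner but over the rows themselves
def chRows (c mh : Int) : List String → Int → Int
  | [], h => h
  | row :: rest, h =>
    match PySem.Str.pyGet? row c with
    | none => h
    | some ch => if ch = '#' then (if h + 1 = mh then h + 1 else chRows c mh rest (h + 1)) else h

lemma chAInner_eq_chRows (schematic : List String) (c mh : Int) :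
    ∀ (rlist : List Int) (R : List String) (h : Int),
      rlist.map (fun r => PySem.List.pyGet? schematic r) = R.map some →
      chAInner schematic c mh rlist h = chRows c mh R h := by
  intro rlist
  induction rlist with
  | nil =>
    intro R h hmap
    cases R with
    | nil => rfl
    | cons a as => simp at hmap
  | cons r rs ih =>
    intro R h hmap
    cases R with
    | nil => simp at hmap
    | cons row rest =>
      simp only [List.map_cons, List.cons.injEq] at hmap
      obtain ⟨h1, h2⟩ := hmap
      simp only [chAInner, chRows, h1, Option.bind_some]
      cases hg : PySem.Str.pyGet? row c with
      | none => rfl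
      | some ch =>
        by_cases hch : ch = '#'
        · by_cases hm : h + 1 = mh
          · simp [hch, hm]
          · simp [hch, hm, ih rest (h + 1) h2]
        · simp [hch]

lemma colHit_true (c : Int) (row : String) (ch : Char)
    (hg : PySem.Str.pyGet? row c = some ch) (hch : ch = '#') : colHit c row = true := by
  unfold colHit; rw [hg, hch]; rfl

lemma colHit_false_of_ne (c : Int) (row : String) (ch : Char)
    (hg : PySem.Str.pyGet? row c = some ch) (hch : ch ≠ '#') : colHit c row = false := by
  unfold colHit; rw [hg]
  simpa using hch

lemma colHit_false_of_none (c : Int) (row : String)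
    (hg : PySem.Str.pyGet? row c = none) : colHit c row = false := by
  unfold colHit; rw [hg]; rfl

lemma runRows_nonneg (c : Int) (R : List String) : 0 ≤ runRows c R := by
  simp [runRows]

lemma chRows_closed (c mh : Int) :
    ∀ (R : List String) (h : Int), 0 ≤ h → (mh ≤ 0 ∨ h < mh) →
      (∀ row ∈ R, (PySem.Str.pyGet? row c).isSome) →
      chRows c mh R h = capH mh (h + runRows c R) := by
  intro R
  induction R with
  | nil =>
    intro h h0 hlt _
    simp only [chRows, runRows, capH, List.takeWhile_nil, List.length_nil, Int.natCast_zero,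
      add_zero]
    split_ifs <;> omega
  | cons row rest ih =>
    intro h h0 hlt hsome
    have hrow := hsome row (by simp)
    have hrun0 := runRows_nonneg c rest
    cases hg : PySem.Str.pyGet? row c with
    | none => rw [hg] at hrow; simp at hrow
    | some ch =>
      by_cases hch : ch = '#'
      · have hhit := colHit_true c row ch hg hch
        have hrun : runRows c (row :: rest) = runRows c rest + 1 := by
          simp [runRows, hhit]
        by_cases hm : h + 1 = mh
        · simp only [chRows, hg, hch, if_pos hm, hrun, capH]
          split_ifs <;> omega
        · simp only [chRows, hg, hch, if_neg hm]
          rw [ih (h + 1) (by omega) (by omega) (fun r hr => hsome r (by simp [hr]))]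
          simp only [hrun, capH]
          split_ifs <;> omega
      · have hhit := colHit_false_of_ne c row ch hg hch
        have hrun : runRows c (row :: rest) = 0 := by
          simp [runRows, hhit]
        simp only [chRows, hg, if_neg hch, hrun, capH]
        split_ifs <;> omega

-- the A-side index list enumerates the rows above the last one, bottom-up
lemma rlist_map (schematic : List String) :
    (PySem.List.pyRange ((schematic.length : Int) - 2) (-1) (-1)).map
        (fun r => PySem.List.pyGet? schematic r)
      = schematic.dropLast.reverse.map some := by
  rw [PySem.List.pyRange_neg_one]
  have hlen : ((schematic.length : Int) - 2 - (-1)).toNat = schematic.length - 1 := by omega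
  rw [hlen]
  apply List.ext_getElem
  · simp
  · intro k hk1 hk2
    simp only [List.length_map, List.length_range] at hk1
    have hklen : k < schematic.length - 1 := hk1
    have hlen2 : 2 ≤ schematic.length := by omega
    simp only [List.getElem_map, List.getElem_range, List.getElem_reverse]
    have hidx : ((schematic.length : Int) - 2 - (k : Int)) = ((schematic.length - 2 - k : Nat) : Int) := by
      omega
    rw [hidx, PySem.List.pyGet?_natCast]
    rw [List.getElem_dropLast]
    rw [List.getElem?_eq_getElem (by omega)]
    congr 2
    have : schematic.dropLast.length = schematic.length - 1 := by simp
    omega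

-- B's per-row update, written as a test on colHit
lemma step_cell (row : String) (c r : Int) :
    bCell row c r = if colHit c row then r + 1 else 0 := by
  unfold bCell
  cases hg : PySem.Str.pyGet? row c with
  | none => rw [colHit_false_of_none c row hg]; rfl
  | some ch =>
    by_cases hch : ch = '#'
    · rw [colHit_true c row ch hg hch]; simp [hch]
    · rw [colHit_false_of_ne c row ch hg hch]; simp [hch]

lemma enumerate_map_map {α β : Type} (n : Nat) (g : Nat → α) (F : Int → α → β) :
    (PySem.List.enumerate ((List.range n).map g) 0).map (fun cr => F cr.1 cr.2)
      = (List.range n).map (fun (k : Nat) => F (k : Int) (g k)) := by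
  apply List.ext_getElem
  · simp [PySem.List.length_enumerate]
  · intro k hk1 hk2
    simp only [List.length_map, PySem.List.length_enumerate, List.length_range] at hk1
    simp [PySem.List.getElem_enumerate, List.getElem_range]

lemma foldB (n : Nat) :
    ∀ (L : List String),
      L.foldl (fun runs row => (PySem.List.enumerate runs 0).map (fun cr => bCell row cr.1 cr.2))
        (List.replicate n (0 : Int))
        = (List.range n).map (fun (k : Nat) => runRows (k : Int) L.reverse) := by
  intro L
  induction L using List.reverseRecOn with
  | nil =>
    apply List.ext_getElem <;> simp [runRows]
  | append_singleton L row ih =>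
    rw [List.foldl_append, List.foldl_cons, List.foldl_nil, ih]
    rw [enumerate_map_map n (fun k => runRows (k : Int) L.reverse) (bCell row)]
    apply List.ext_getElem
    · simp
    · intro k hk1 hk2
      simp only [List.length_map, List.length_range] at hk1
      simp only [List.getElem_map, List.getElem_range]
      rw [step_cell]
      have hrev : (L ++ [row]).reverse = row :: L.reverse := by simp
      rw [hrev]
      by_cases hhit : colHit (k : Int) row
      · simp only [runRows, List.takeWhile_cons, hhit, if_pos, List.length_cons]
        push_cast
        omega
      · simp [runRows, hhit]

-- closed form of B (no precondition needed)
lemma alt_closed (schematic : List String) (num_cols max_height : Int) :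
    compute_key_heights_alt schematic num_cols max_height
      = (List.range num_cols.toNat).map
          (fun (k : Nat) => min (runRows (k : Int) schematic.dropLast.reverse) max_height) := by
  unfold compute_key_heights_alt
  rw [PySem.List.slice_to_neg_one, foldB, List.map_map]
  apply List.map_congr_left
  intro k hk
  simp [Function.comp]

-- closed form of A under Pre_
lemma a_closed (schematic : List String) (num_cols max_height : Int)
    (hpre : num_cols ≤ 0 ∨ ∀ row ∈ schematic.dropLast, num_cols ≤ PySem.Str.len row) :
    compute_key_heights schematic num_cols max_height
      = (List.range num_cols.toNat).map
          (fun (k : Nat) => capH max_height (runRows (k : Int) schematic.dropLast.reverse)) := by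
  unfold compute_key_heights
  rw [PySem.List.foldl_append_singleton_eq_map, List.nil_append]
  rw [PySem.List.pyRange_one]
  have hnn : (num_cols - 0).toNat = num_cols.toNat := by omega
  rw [hnn, List.map_map]
  apply List.map_congr_left
  intro k hk
  simp only [Function.comp_apply, zero_add]
  have hkn : (k : Int) < num_cols := by
    rw [List.mem_range] at hk; omega
  rw [chAInner_eq_chRows schematic (k : Int) max_height _ _ _ (rlist_map schematic)]
  rw [chRows_closed (k : Int) max_height _ 0 le_rfl (by omega), zero_add]
  intro row hrow
  rw [List.mem_reverse] at hrow
  rcases hpre with hle | hall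
  · omega
  · have hlenr := hall row hrow
    rw [PySem.Str.len_eq] at hlenr
    have hk2 : k < row.toList.length := by omega
    rw [PySem.Str.pyGet?_natCast]
    simp [List.getElem?_eq_getElem hk2]

-- ===== VERDICT (by name: the statement is the Claim_ definition above) =====
theorem compute_key_heights_spec : Claim_equal_compute_key_heights := by
  intro schematic num_cols max_height _ hpre
  unfold Spec_compute_key_heights
  have hrows : num_cols ≤ 0 ∨ ∀ row ∈ schematic.dropLast, num_cols ≤ PySem.Str.len row := by
    rcases hpre with h | h
    · exact Or.inl h
    · exact Or.inr h.2
  rw [a_closed schematic num_cols max_height hrows, alt_closed]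
  apply List.map_congr_left
  intro k hk
  rw [List.mem_range] at hk
  have hpos : 0 < num_cols := by omega
  have hmh : 1 ≤ max_height := by
    rcases hpre with h | h
    · omega
    · exact h.1
  simp only [capH, if_pos (by omega : max_height > 0)]
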